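-- pv_equiv track=rewrite | github.com/huawei-noah/xingtian | examples/chinese_chess/self_play_worker.py | count_piece
-- ===== SOURCE A (Python) =====
-- def count_piece(state_str):
--     pieceset = {
--         'A',
--         'B',
--         'C',
--         'K',
--         'N',
--         'P',
--         'R',
--         'a',
--         'b',
--         'c',
--         'k',
--         'n',
--         'p',
--         'r'
--     }
--     return sum([1 for single_chessman in state_str if single_chessman in pieceset])
-- ===== SOURCE B (Python) =====
-- from collections import Counter
--
-- def count_piece(state_str):
--     counts = Counter(state_str)
--     total = 0
--     for c in 'abcknpr':
--         total += counts[c] + counts[c.upper()]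
--     return total
-- ===== Notes on version B (the rewrite author's own statement) =====
-- stated objective: alternative
-- what changed: Instead of a membership-filtered pass over the string that sums 1 per piece character, B tabulates a full character-frequency Counter once and then sums, per lowercase piece letter, the counts of the letter and of its uppercase form.
import Mathlib
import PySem

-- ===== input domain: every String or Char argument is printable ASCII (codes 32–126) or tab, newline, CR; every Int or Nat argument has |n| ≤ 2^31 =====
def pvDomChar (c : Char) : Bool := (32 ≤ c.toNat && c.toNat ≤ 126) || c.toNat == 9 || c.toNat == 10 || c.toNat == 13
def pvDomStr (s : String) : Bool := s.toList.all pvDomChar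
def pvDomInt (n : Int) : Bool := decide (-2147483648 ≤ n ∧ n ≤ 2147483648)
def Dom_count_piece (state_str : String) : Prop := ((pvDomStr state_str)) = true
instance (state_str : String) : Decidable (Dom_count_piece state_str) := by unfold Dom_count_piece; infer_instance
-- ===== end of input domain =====

-- B is a different structure, not a speed claim: A filters the string by membership in a
-- 14-element set and sums 1s; B builds a character-frequency table (Counter) once and then
-- sums, for each of the 7 lowercase piece letters, the count of that letter and of its uppercase.

-- ===== PORT A =====
-- the set literal 'pieceset'
def pvPiecesA : PySem.Set Char :=
  PySem.Set.ofList ['A','B','C','K','N','P','R','a','b','c','k','n','p','r']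

def count_piece (state_str : String) : Int :=
  ((state_str.toList.filter (fun single_chessman => PySem.Set.contains pvPiecesA single_chessman)).map
    (fun _ => (1 : Int))).sum

-- ===== PORT B =====
def count_piece_alt (state_str : String) : Int :=
  let counts := PySem.Dict.counter state_str.toList
  (['a','b','c','k','n','p','r'] : List Char).foldl
    (fun total c => total + (counts.getD c 0 + counts.getD (PySem.Chars.upperChar c) 0)) 0

-- ===== PRECONDITION & SPEC =====
def Spec_count_piece (state_str : String) (out : Int) : Prop := out = count_piece_alt state_str
instance (state_str : String) (out : Int) : Decidable (Spec_count_piece state_str out) := by unfold Spec_count_piece; infer_instance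

-- ===== CLAIM (what is proved, stated in full; the proofs are below) =====
def Claim_equal_count_piece : Prop := ∀ (state_str : String), Dom_count_piece state_str → Spec_count_piece state_str (count_piece state_str)

-- ===== LEMMAS AND PROOFS =====

-- the 14 piece characters in the interleaved order in which B's summation visits them
def pvPairs14 : List Char := ['a','A','b','B','c','C','k','K','n','N','p','P','r','R']

-- sum of a 0/1 indicator over a duplicate-free key list is a membership test
theorem pv_sum_indicator_not_mem (x : Char) (ps : List Char) (h : x ∉ ps) :
    (ps.map (fun c => if x == c then (1 : Int) else 0)).sum = 0 := by
  induction ps with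
  | nil => simp
  | cons c rest ih =>
    have hcx : ¬ (x == c) = true := by
      simp only [beq_iff_eq]
      rintro rfl; exact h (List.mem_cons_self ..)
    simp only [List.map_cons, List.sum_cons, if_neg hcx]
    rw [ih (fun hm => h (List.mem_cons_of_mem _ hm))]
    simp

theorem pv_sum_indicator (x : Char) (ps : List Char) (h : ps.Nodup) :
    (ps.map (fun c => if x == c then (1 : Int) else 0)).sum
      = if ps.contains x then 1 else 0 := by
  induction ps with
  | nil => simp
  | cons c rest ih =>
    rcases List.nodup_cons.mp h with ⟨hc, hrest⟩
    by_cases hx : c = x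
    · subst hx
      simp only [List.map_cons, List.sum_cons, if_pos (beq_self_eq_true c)]
      rw [pv_sum_indicator_not_mem c rest hc]
      simp
    · have hcx : ¬ (x == c) = true := by
        simp only [beq_iff_eq]; exact fun h' => hx h'.symm
      simp only [List.map_cons, List.sum_cons, if_neg hcx, ih hrest,
        List.contains_cons]
      simp [Ne.symm hx]

-- summing the per-character counts over a duplicate-free key list counts exactly the
-- characters that belong to the key list
theorem pv_sum_counts (ps : List Char) (h : ps.Nodup) (l : List Char) :
    (ps.map (fun c => (l.count c : Int))).sum
      = (l.countP (fun c => ps.contains c) : Int) := by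
  induction l with
  | nil => simp
  | cons x l ih =>
    have hcount : ∀ c : Char, ((x :: l).count c : Int)
        = (l.count c : Int) + (if x == c then (1 : Int) else 0) := by
      intro c
      rw [List.count_cons]
      push_cast
      rfl
    have hsplit : (ps.map (fun c => ((x :: l).count c : Int))).sum
        = (ps.map (fun c => (l.count c : Int))).sum
          + (ps.map (fun c => if x == c then (1 : Int) else 0)).sum := by
      rw [← List.sum_map_add]
      exact congrArg List.sum (List.map_congr_left (fun c _ => hcount c))
    rw [hsplit, ih, pv_sum_indicator x ps h, List.countP_cons]
    push_cast
    split_ifs <;> simp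

theorem pv_pairs14_nodup : pvPairs14.Nodup := by decide

-- the two fixed key collections hold the same characters
theorem pv_contains_pairs14 (c : Char) :
    pvPairs14.contains c = PySem.Set.contains pvPiecesA c := by
  by_cases h : c ∈ pvPairs14
  · have h2 : c ∈ pvPiecesA := by
      unfold pvPiecesA
      rw [PySem.Set.mem_ofList]
      fin_cases h <;> decide
    simp [h, h2]
  · have h2 : c ∉ pvPiecesA := by
      intro hm
      apply h
      unfold pvPiecesA at hm
      rw [PySem.Set.mem_ofList] at hm
      fin_cases hm <;> decide
    simp only [PySem.Set.contains_eq_listContains]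
    simp [h, h2]

-- ===== VERDICT (by name: the statement is the Claim_ definition above) =====
theorem count_piece_spec : Claim_equal_count_piece := by
  intro s _
  show count_piece s = count_piece_alt s
  unfold count_piece count_piece_alt
  rw [PySem.List.foldl_add
    (g := fun c => (PySem.Dict.counter s.toList).getD c 0
      + (PySem.Dict.counter s.toList).getD (PySem.Chars.upperChar c) 0)]
  have hup : (['a','b','c','k','n','p','r'] : List Char).map
      (fun c => (PySem.Dict.counter s.toList).getD c 0
        + (PySem.Dict.counter s.toList).getD (PySem.Chars.upperChar c) 0)
      = [('a','A'),('b','B'),('c','C'),('k','K'),('n','N'),('p','P'),('r','R')].map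
        (fun p => (PySem.Dict.counter s.toList).getD p.1 0
          + (PySem.Dict.counter s.toList).getD p.2 0) := by
    simp only [List.map_cons, List.map_nil]
    norm_num [show PySem.Chars.upperChar 'a' = 'A' from by decide,
      show PySem.Chars.upperChar 'b' = 'B' from by decide,
      show PySem.Chars.upperChar 'c' = 'C' from by decide,
      show PySem.Chars.upperChar 'k' = 'K' from by decide,
      show PySem.Chars.upperChar 'n' = 'N' from by decide,
      show PySem.Chars.upperChar 'p' = 'P' from by decide,
      show PySem.Chars.upperChar 'r' = 'R' from by decide]
  rw [hup]
  have hflat : ([('a','A'),('b','B'),('c','C'),('k','K'),('n','N'),('p','P'),('r','R')].map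
      (fun p => (PySem.Dict.counter s.toList).getD p.1 0
        + (PySem.Dict.counter s.toList).getD p.2 0)).sum
      = (pvPairs14.map (fun c => (PySem.Dict.counter s.toList).getD c 0)).sum := by
    simp only [List.map_cons, List.map_nil, List.sum_cons, List.sum_nil, pvPairs14]
    ring
  rw [hflat]
  have hc : (pvPairs14.map (fun c => (PySem.Dict.counter s.toList).getD c 0)).sum
      = (pvPairs14.map (fun c => (s.toList.count c : Int))).sum :=
    congrArg List.sum (List.map_congr_left (fun c _ => PySem.Dict.getD_counter ..))
  rw [hc, pv_sum_counts pvPairs14 pv_pairs14_nodup]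
  have hpred : s.toList.countP (fun c => pvPairs14.contains c)
      = s.toList.countP (fun c => PySem.Set.contains pvPiecesA c) :=
    List.countP_congr (fun c _ => by rw [pv_contains_pairs14 c])
  rw [hpred]
  simp [List.countP_eq_length_filter]
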